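-- pv_equiv track=rewrite | github.com/Uxinnn/Advent-of-Code | 2021/day14/day14.py | get_most_least_common_element
-- ===== SOURCE A (Python) =====
-- from collections import defaultdict
--
-- def get_most_least_common_element(template):
--     element_counts = defaultdict(int)
--     for pair, value in template.items():
--         element_counts[pair[0]] += value
--         element_counts[pair[1]] += value
--     for element, count in element_counts.items():
--         element_counts[element] = -(count // -2)  # Ceiling division by 2
--     counts = element_counts.values()
--     return max(counts), min(counts)
-- ===== SOURCE B (Python) =====
-- def get_most_least_common_element(template):
--     # No counting dict at all: scan the pairs, and for each character the
--     # first time it is seen, total its contributions with two direct sums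
--     # over the pairs, tracking running max/min; ceiling-halve only at the end
--     # (ceiling division by 2 is monotone, so it commutes with max/min).
--     items = list(template.items())
--     seen = []
--     hi = lo = None
--     for pair, _ in items:
--         for ch in (pair[0], pair[1]):
--             if ch in seen:
--                 continue
--             seen.append(ch)
--             total = sum(v for p, v in items if p[0] == ch) \
--                   + sum(v for p, v in items if p[1] == ch)
--             if hi is None or total > hi:
--                 hi = total
--             if lo is None or total < lo:
--                 lo = total
--     return -(hi // -2), -(lo // -2)
-- ===== Notes on version B (the rewrite author's own statement) =====
-- stated objective: alternative
-- what changed: B keeps no counting dictionary and no rewrite pass: it scans the pairs, and for each character at its first occurrence computes its total directly with two sums over the pair list, maintaining a running max/min, and applies the ceiling-halving only to the two final extrema (it is monotone); it trades A's O(n) hash aggregation for an O(n*k) dict-free scan.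
import Mathlib
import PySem

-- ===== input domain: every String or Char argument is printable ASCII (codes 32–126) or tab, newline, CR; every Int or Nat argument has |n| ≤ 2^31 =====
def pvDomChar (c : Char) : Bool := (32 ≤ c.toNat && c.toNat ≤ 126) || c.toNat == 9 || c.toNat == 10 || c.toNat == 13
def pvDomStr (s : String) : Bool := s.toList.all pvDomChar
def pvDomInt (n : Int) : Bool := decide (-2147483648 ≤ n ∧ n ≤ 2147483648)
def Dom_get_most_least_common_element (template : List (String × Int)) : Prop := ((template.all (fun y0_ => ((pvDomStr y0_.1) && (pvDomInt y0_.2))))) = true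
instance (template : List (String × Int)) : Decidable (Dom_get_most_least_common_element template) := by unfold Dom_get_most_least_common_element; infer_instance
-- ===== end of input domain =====

-- B drops A's counting dict and rewrite pass: a first-occurrence scan totals each character
-- by direct sums over the pairs and tracks running max/min (objective: alternative).

-- ===== PORT A =====
-- A, step for step: defaultdict accumulation over template.items() (two += per pair),
-- then an in-place pass replacing every count with -(count // -2), then (max, min) of the values.
-- `(PySem.Str.pyGet? s i).getD ' '` : the `none` (IndexError) case is excluded by Pre_.
def get_most_least_common_element (template : List (String × Int)) : Int × Int :=
  let element_counts : PySem.Dict Char Int :=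
    template.foldl (fun ec pv =>
      let ec := ec.modify ((PySem.Str.pyGet? pv.1 0).getD ' ') 0 (· + pv.2)
      ec.modify ((PySem.Str.pyGet? pv.1 1).getD ' ') 0 (· + pv.2)) PySem.Dict.empty
  let element_counts :=
    element_counts.items.foldl (fun d kc => d.insert kc.1 (-(PySem.Int.floordiv kc.2 (-2)))) element_counts
  let counts := element_counts.values
  ((PySem.List.max? counts (fun x => x)).getD 0, (PySem.List.min? counts (fun x => x)).getD 0)

-- ===== PORT B =====
-- B, step for step.  pvBVisit is the body of Source B's inner loop: skip an already-seen
-- character, otherwise record it, total its contributions with two direct sums over the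
-- pair list, and update the running max/min options.
def pvBVisit (items : List (String × Int))
    (st : PySem.Set Char × Option Int × Option Int) (ch : Char) :
    PySem.Set Char × Option Int × Option Int :=
  if PySem.Set.contains st.1 ch then st
  else
    let seen := st.1 ++ [ch]
    let total :=
      ((items.filter (fun p => (PySem.Str.pyGet? p.1 0).getD ' ' == ch)).map (·.2)).sum
      + ((items.filter (fun p => (PySem.Str.pyGet? p.1 1).getD ' ' == ch)).map (·.2)).sum
    let hi := match st.2.1 with
      | none => some total
      | some h => if h < total then some total else some h
    let lo := match st.2.2 with
      | none => some total
      | some l => if total < l then some total else some l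
    (seen, hi, lo)

def get_most_least_common_element_alt (template : List (String × Int)) : Int × Int :=
  let st :=
    template.foldl (fun st pv =>
      [(PySem.Str.pyGet? pv.1 0).getD ' ', (PySem.Str.pyGet? pv.1 1).getD ' '].foldl
        (pvBVisit template) st)
      (PySem.Set.empty, none, none)
  (-(PySem.Int.floordiv (st.2.1.getD 0) (-2)), -(PySem.Int.floordiv (st.2.2.getD 0) (-2)))

-- ===== PRECONDITION & SPEC =====
-- A raises on exactly these inputs: ValueError from max() when the dict is empty,
-- IndexError from pair[1] when some key has fewer than two characters.
def Pre_get_most_least_common_element (template : List (String × Int)) : Prop :=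
  template ≠ [] ∧ ∀ p ∈ template, 2 ≤ PySem.Str.len p.1
instance (template : List (String × Int)) : Decidable (Pre_get_most_least_common_element template) := by
  unfold Pre_get_most_least_common_element; infer_instance
def pvWitness_get_most_least_common_element : (List (String × Int)) := [("ab", 3), ("ba", 1)]
def Spec_get_most_least_common_element (template : List (String × Int)) (out : Int × Int) : Prop := out = get_most_least_common_element_alt template
instance (template : List (String × Int)) (out : Int × Int) : Decidable (Spec_get_most_least_common_element template out) := by unfold Spec_get_most_least_common_element; infer_instance

-- ===== CLAIM (what is proved, stated in full; the proofs are below) =====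
def Claim_equal_get_most_least_common_element : Prop := ∀ (template : List (String × Int)), Dom_get_most_least_common_element template → Pre_get_most_least_common_element template → Spec_get_most_least_common_element template (get_most_least_common_element template)

-- ===== LEMMAS AND PROOFS =====

-- abbreviations for the two characters of a pair, the flattened contribution streams,
-- and B's per-character total
def pvC0 (pv : String × Int) : Char := (PySem.Str.pyGet? pv.1 0).getD ' '
def pvC1 (pv : String × Int) : Char := (PySem.Str.pyGet? pv.1 1).getD ' '
def pvCs (tl : List (String × Int)) : List Char := tl.flatMap (fun pv => [pvC0 pv, pvC1 pv])
def pvContribs (tl : List (String × Int)) : List (Char × Int) :=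
  tl.flatMap (fun pv => [(pvC0 pv, pv.2), (pvC1 pv, pv.2)])
def pvS (tl : List (String × Int)) (c : Char) : Int :=
  ((tl.filter (fun p => pvC0 p == c)).map (·.2)).sum
  + ((tl.filter (fun p => pvC1 p == c)).map (·.2)).sum

-- ceiling division by 2: closed form and monotonicity
theorem pv_ceil2_eq (a : Int) : -(PySem.Int.floordiv a (-2)) = (a + 1) / 2 := by
  have h1 := PySem.Int.floordiv_mul_add_mod a (-2)
  have h2 := PySem.Int.mod_neg_bounds (a := a) (b := -2) (by norm_num)
  omega

theorem pv_ceil2_mono {a b : Int} (h : a ≤ b) :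
    -(PySem.Int.floordiv a (-2)) ≤ -(PySem.Int.floordiv b (-2)) := by
  rw [pv_ceil2_eq, pv_ceil2_eq]; omega

theorem pv_ceil2_max (a b : Int) :
    -(PySem.Int.floordiv (max a b) (-2)) = max (-(PySem.Int.floordiv a (-2))) (-(PySem.Int.floordiv b (-2))) := by
  rcases le_total a b with h | h
  · rw [max_eq_right h, max_eq_right (pv_ceil2_mono h)]
  · rw [max_eq_left h, max_eq_left (pv_ceil2_mono h)]

theorem pv_ceil2_min (a b : Int) :
    -(PySem.Int.floordiv (min a b) (-2)) = min (-(PySem.Int.floordiv a (-2))) (-(PySem.Int.floordiv b (-2))) := by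
  rcases le_total a b with h | h
  · rw [min_eq_left h, min_eq_left (pv_ceil2_mono h)]
  · rw [min_eq_right h, min_eq_right (pv_ceil2_mono h)]

-- A's accumulation loop, flattened to one fold over the contribution stream
theorem pv_a_flat (tl : List (String × Int)) (d : PySem.Dict Char Int) :
    tl.foldl (fun ec pv =>
      let ec := ec.modify ((PySem.Str.pyGet? pv.1 0).getD ' ') 0 (· + pv.2)
      ec.modify ((PySem.Str.pyGet? pv.1 1).getD ' ') 0 (· + pv.2)) d
    = (pvContribs tl).foldl (fun d cv => d.modify cv.1 0 (· + cv.2)) d := by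
  induction tl generalizing d with
  | nil => rfl
  | cons p t ih =>
    have hc : pvContribs (p :: t) = (pvC0 p, p.2) :: (pvC1 p, p.2) :: pvContribs t := by
      simp [pvContribs]
    rw [hc, List.foldl_cons, List.foldl_cons, List.foldl_cons]
    exact ih _

-- the accumulated count of one character is the filtered sum of contributions
theorem pv_getD_fold (l : List (Char × Int)) (d : PySem.Dict Char Int) (c : Char) :
    (l.foldl (fun d cv => d.modify cv.1 0 (· + cv.2)) d).getD c 0
      = d.getD c 0 + ((l.filter (fun cv => cv.1 == c)).map (·.2)).sum := by
  induction l generalizing d with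
  | nil => simp
  | cons cv t ih =>
    rw [List.foldl_cons, ih, PySem.Dict.getD_modify]
    by_cases h : c = cv.1
    · simp [h]
      omega
    · simp [h, Ne.symm h]

-- the filtered contribution sum is B's two direct sums
theorem pv_total_eq (tl : List (String × Int)) (c : Char) :
    (((pvContribs tl).filter (fun cv => cv.1 == c)).map (·.2)).sum = pvS tl c := by
  induction tl with
  | nil => simp [pvContribs, pvS]
  | cons p t ih =>
    simp only [pvContribs, List.flatMap_cons, List.filter_append, List.filter_cons] at *
    simp only [pvS, List.filter_cons] at *
    by_cases h0 : pvC0 p == c <;> by_cases h1 : pvC1 p == c <;>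
      simp [h0, h1, List.sum_cons] at * <;> omega

-- B's double loop, flattened to one fold over the character stream
theorem pv_b_flat (T : List (String × Int)) (tl : List (String × Int))
    (st : PySem.Set Char × Option Int × Option Int) :
    tl.foldl (fun st pv =>
      [(PySem.Str.pyGet? pv.1 0).getD ' ', (PySem.Str.pyGet? pv.1 1).getD ' '].foldl
        (pvBVisit T) st) st
    = (pvCs tl).foldl (pvBVisit T) st := by
  induction tl generalizing st with
  | nil => rfl
  | cons p t ih =>
    rw [List.foldl_cons, pvCs, List.flatMap_cons, List.foldl_append, ← pvCs, ih]
    rfl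

-- the characters kept by B's first-occurrence filter, relative to a seen-list
def pvNew : List Char → List Char → List Char
  | _, [] => []
  | s, c :: cs => if PySem.Set.contains s c then pvNew s cs else c :: pvNew (s ++ [c]) cs

-- B's running-max / running-min option updates
def pvOMax (T : List (String × Int)) (h : Option Int) (c : Char) : Option Int :=
  match h with
  | none => some (pvS T c)
  | some x => if x < pvS T c then some (pvS T c) else some x
def pvOMin (T : List (String × Int)) (l : Option Int) (c : Char) : Option Int :=
  match l with
  | none => some (pvS T c)
  | some x => if pvS T c < x then some (pvS T c) else some x

-- invariant of B's scan
theorem pv_inv (T : List (String × Int)) (cs : List Char) :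
    ∀ (s : PySem.Set Char) (h l : Option Int),
    cs.foldl (pvBVisit T) (s, h, l)
      = (s ++ pvNew s cs, (pvNew s cs).foldl (pvOMax T) h, (pvNew s cs).foldl (pvOMin T) l) := by
  induction cs with
  | nil => intro s h l; simp [pvNew]
  | cons c cs ih =>
    intro s h l
    by_cases hc : c ∈ s
    · rw [List.foldl_cons]
      have hv : pvBVisit T (s, h, l) c = (s, h, l) := by simp [pvBVisit, hc]
      rw [hv, ih]
      simp [pvNew, hc]
    · rw [List.foldl_cons]
      have hv : pvBVisit T (s, h, l) c = (s ++ [c], pvOMax T h c, pvOMin T l c) := by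
        have hcon : PySem.Set.contains s c = false := by simp [hc]
        simp only [pvBVisit, hcon, Bool.false_eq_true, if_false]
        rfl
      rw [hv, ih]
      simp [pvNew, hc]

-- the kept characters are exactly the set-update of the seen-list
theorem pv_new_update (cs : List Char) : ∀ (s : PySem.Set Char),
    s ++ pvNew s cs = PySem.Set.update s cs := by
  induction cs with
  | nil => intro s; simp [pvNew, PySem.Set.update]
  | cons c cs ih =>
    intro s
    by_cases hc : c ∈ s
    · show s ++ pvNew s (c :: cs) = (c :: cs).foldl PySem.Set.add s
      rw [List.foldl_cons]
      have : PySem.Set.add s c = s := by simp [PySem.Set.add, hc]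
      rw [this]
      simpa [pvNew, hc] using ih s
    · show s ++ pvNew s (c :: cs) = (c :: cs).foldl PySem.Set.add s
      rw [List.foldl_cons]
      have : PySem.Set.add s c = s ++ [c] := by simp [PySem.Set.add, hc]
      rw [this]
      have h2 := ih (s ++ [c])
      have h3 : pvNew s (c :: cs) = c :: pvNew (s ++ [c]) cs := by simp [pvNew, hc]
      have h4 : List.foldl PySem.Set.add (s ++ [c]) cs = PySem.Set.update (s ++ [c]) cs := rfl
      rw [h3, h4, ← h2]
      simp
    
-- running max over a nonempty stream is the fold of max
theorem pv_omax_some (T : List (String × Int)) (ks : List Char) : ∀ (x : Int),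
    ks.foldl (pvOMax T) (some x) = some ((ks.map (pvS T)).foldl max x) := by
  induction ks with
  | nil => intro x; rfl
  | cons k ks ih =>
    intro x
    have : pvOMax T (some x) k = some (max x (pvS T k)) := by
      simp only [pvOMax]
      rcases lt_or_ge x (pvS T k) with h | h
      · rw [if_pos h, max_eq_right (le_of_lt h)]
      · rw [if_neg (not_lt.mpr h), max_eq_left h]
    rw [List.foldl_cons, this, ih, List.map_cons, List.foldl_cons]

theorem pv_omin_some (T : List (String × Int)) (ks : List Char) : ∀ (x : Int),
    ks.foldl (pvOMin T) (some x) = some ((ks.map (pvS T)).foldl min x) := by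
  induction ks with
  | nil => intro x; rfl
  | cons k ks ih =>
    intro x
    have : pvOMin T (some x) k = some (min x (pvS T k)) := by
      simp only [pvOMin]
      rcases lt_or_ge (pvS T k) x with h | h
      · rw [if_pos h, min_eq_right (le_of_lt h)]
      · rw [if_neg (not_lt.mpr h), min_eq_left h]
    rw [List.foldl_cons, this, ih, List.map_cons, List.foldl_cons]

-- A's in-place ceiling pass rewrites the items pointwise (keys unique)
theorem pv_second_pass (g : Int → Int) :
    ∀ (post pre : List (Char × Int)), ((pre ++ post).map Prod.fst).Nodup →
    post.foldl (fun d kc => d.insert kc.1 (g kc.2)) (PySem.Dict.mk (pre ++ post))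
      = PySem.Dict.mk (pre ++ post.map (fun kc => (kc.1, g kc.2))) := by
  intro post
  induction post with
  | nil => intro pre _; simp
  | cons kv rest ih =>
    intro pre hnd
    obtain ⟨k, v⟩ := kv
    have hnd2 : (List.map Prod.fst pre ++ k :: List.map Prod.fst rest).Nodup := by
      simpa using hnd
    obtain ⟨hnp, hck, hdisj⟩ := List.nodup_append.mp hnd2
    have hkrest : k ∉ List.map Prod.fst rest := (List.nodup_cons.mp hck).1
    have hkpre : k ∉ List.map Prod.fst pre := fun hm => hdisj k hm k (by simp) rfl
    have hk_pre : ∀ q ∈ pre, q.1 ≠ k := fun q hq h => hkpre (h ▸ List.mem_map_of_mem hq)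
    have hk_rest : ∀ q ∈ rest, q.1 ≠ k := fun q hq h => hkrest (h ▸ List.mem_map_of_mem hq)
    have hcont : (PySem.Dict.mk (pre ++ (k, v) :: rest)).contains k = true := by
      simp [PySem.Dict.contains_mk]
    have hpre_map : pre.map (fun p => if p.1 == k then (k, g v) else p) = pre := by
      have h1 : pre.map (fun p => if p.1 == k then (k, g v) else p) = pre.map id :=
        List.map_congr_left (fun q hq => by
          simp [beq_eq_false_iff_ne.mpr (hk_pre q hq)])
      simpa using h1
    have hrest_map : rest.map (fun p => if p.1 == k then (k, g v) else p) = rest := by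
      have h1 : rest.map (fun p => if p.1 == k then (k, g v) else p) = rest.map id :=
        List.map_congr_left (fun q hq => by
          simp [beq_eq_false_iff_ne.mpr (hk_rest q hq)])
      simpa using h1
    have hstep : (PySem.Dict.mk (pre ++ (k, v) :: rest)).insert k (g v)
        = PySem.Dict.mk ((pre ++ [(k, g v)]) ++ rest) := by
      apply PySem.Dict.ext
      rw [PySem.Dict.items_insert, hcont, if_pos rfl]
      show (pre ++ (k, v) :: rest).map _ = _
      rw [List.map_append, List.map_cons, hpre_map, hrest_map]
      simp
    have hmapeq : List.map Prod.fst ((pre ++ [(k, g v)]) ++ rest)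
        = List.map Prod.fst (pre ++ (k, v) :: rest) := by simp
    rw [List.foldl_cons, hstep, ih (pre ++ [(k, g v)]) (by rw [hmapeq]; exact hnd)]
    simp

-- second pass, specialized to folding over the dict's own items
theorem pv_second_pass' (g : Int → Int) (d : PySem.Dict Char Int)
    (hnd : (d.items.map Prod.fst).Nodup) :
    d.items.foldl (fun dd kc => dd.insert kc.1 (g kc.2)) d
      = PySem.Dict.mk (d.items.map (fun kc => (kc.1, g kc.2))) := by
  cases d with
  | mk l =>
    have h := pv_second_pass g l [] (by simpa using hnd)
    simpa using h

-- max/min of a list mapped through the monotone ceiling-halving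
theorem pv_foldl_max_ceil2 (t : List Int) (x : Int) :
    (t.map (fun c => -(PySem.Int.floordiv c (-2)))).foldl max (-(PySem.Int.floordiv x (-2)))
      = -(PySem.Int.floordiv (t.foldl max x) (-2)) := by
  induction t generalizing x with
  | nil => rfl
  | cons a t ih => simp only [List.map_cons, List.foldl_cons, ← pv_ceil2_max, ih]

theorem pv_foldl_min_ceil2 (t : List Int) (x : Int) :
    (t.map (fun c => -(PySem.Int.floordiv c (-2)))).foldl min (-(PySem.Int.floordiv x (-2)))
      = -(PySem.Int.floordiv (t.foldl min x) (-2)) := by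
  induction t generalizing x with
  | nil => rfl
  | cons a t ih => simp only [List.map_cons, List.foldl_cons, ← pv_ceil2_min, ih]

-- extremum-of-map step, packaged for both components
theorem pv_maxmin_map (v : Int) (t : List Int) :
    (PySem.List.max? ((v :: t).map (fun c => -(PySem.Int.floordiv c (-2)))) (fun x => x)).getD 0
        = -(PySem.Int.floordiv ((PySem.List.max? (v :: t) (fun x => x)).getD 0) (-2)) ∧
    (PySem.List.min? ((v :: t).map (fun c => -(PySem.Int.floordiv c (-2)))) (fun x => x)).getD 0
        = -(PySem.Int.floordiv ((PySem.List.min? (v :: t) (fun x => x)).getD 0) (-2)) := by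
  constructor
  · rw [List.map_cons, PySem.List.max?_id_cons, PySem.List.max?_id_cons]
    simp [pv_foldl_max_ceil2]
  · rw [List.map_cons, PySem.List.min?_id_cons, PySem.List.min?_id_cons]
    simp [pv_foldl_min_ceil2]

-- ===== VERDICT (by name: the statement is the Claim_ definition above) =====
theorem get_most_least_common_element_spec : Claim_equal_get_most_least_common_element := by
  intro template _hdom hpre
  unfold Spec_get_most_least_common_element
  simp only [get_most_least_common_element, get_most_least_common_element_alt]
  rw [pv_a_flat, pv_b_flat]
  set d1 := (pvContribs template).foldl (fun d cv => d.modify cv.1 0 (· + cv.2)) PySem.Dict.empty with hd1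
  -- keys of the accumulated dict = B's first-occurrence character list
  have hkeys : d1.keys = pvNew [] (pvCs template) := by
    rw [hd1, PySem.Dict.keys_foldl_modify_key (key := Prod.fst)]
    have hmapfst : (pvContribs template).map Prod.fst = pvCs template := by
      simp [pvContribs, pvCs, List.map_flatMap]
    rw [hmapfst, PySem.Dict.keys_empty]
    exact (pv_new_update (pvCs template) []).symm
  have hnd : d1.keys.Nodup := by
    rw [hd1]
    exact PySem.Dict.nodup_keys_foldl_modify_key _ _ _ _ _ (by simp)
  -- values of the accumulated dict = B's totals over those characters
  have hvalsraw : d1.values = (pvNew [] (pvCs template)).map (pvS template) := by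
    rw [PySem.Dict.values_eq_map_keys d1 hnd 0, hkeys]
    apply List.map_congr_left
    intro c _
    rw [hd1, pv_getD_fold, PySem.Dict.getD_empty, pv_total_eq]
    ring
  -- second pass: every value ceiling-halved
  rw [pv_second_pass' (fun c => -(PySem.Int.floordiv c (-2))) d1 hnd]
  have hvals : (PySem.Dict.mk (d1.items.map (fun kc => (kc.1, -(PySem.Int.floordiv kc.2 (-2)))))).values
      = d1.values.map (fun c => -(PySem.Int.floordiv c (-2))) := by
    show (d1.items.map _).map _ = (d1.items.map _).map _
    simp [Function.comp]
  rw [hvals, hvalsraw]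
  -- B's scan, by the invariant
  have hemp : (PySem.Set.empty : PySem.Set Char) = [] := rfl
  rw [hemp, pv_inv template (pvCs template) [] none none]
  -- the character list is nonempty
  obtain ⟨p, t, rfl⟩ : ∃ p t, template = p :: t := by
    cases template with
    | nil => exact absurd rfl hpre.1
    | cons p t => exact ⟨p, t, rfl⟩
  have hcs : pvCs (p :: t) = pvC0 p :: pvC1 p :: pvCs t := by simp [pvCs]
  obtain ⟨k0, ks, hK⟩ : ∃ k0 ks, pvNew [] (pvCs (p :: t)) = k0 :: ks := by
    rw [hcs]
    refine ⟨pvC0 p, pvNew [pvC0 p] (pvC1 p :: pvCs t), ?_⟩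
    simp [pvNew]
  rw [hK]
  have hmm := pv_maxmin_map (pvS (p :: t) k0) (ks.map (pvS (p :: t)))
  simp only [List.map_cons] at hmm ⊢
  rw [hmm.1, hmm.2, List.foldl_cons, List.foldl_cons]
  have hx : pvOMax (p :: t) none k0 = some (pvS (p :: t) k0) := rfl
  have hn : pvOMin (p :: t) none k0 = some (pvS (p :: t) k0) := rfl
  rw [hx, hn, pv_omax_some, pv_omin_some,
      PySem.List.max?_id_cons, PySem.List.min?_id_cons]
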